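-- pv_equiv track=rewrite | github.com/05mengmeizi/pytorch | torch/distributed/pipelining/_utils.py | generate_rank_to_stage_mapping
-- ===== SOURCE A (Python) =====
-- def generate_stage_to_rank_mapping(
--     pp_size: int, num_stages: int, style: str = "loop"
-- ) -> dict[int, int]:
--     """
--     Compute the stage id to rank mapping for either a looped or V-style schedule.
--
--     Most commonly num_stages == pp_size * 2, but this function can be used to
--     compute the mapping for any number of stages per rank.
--     """
--     mapping = {}
--     if style == "loop":
--         for stage_index in range(num_stages):
--             mapping[stage_index] = stage_index % pp_size
--     elif style == "v":
--         if num_stages % pp_size != 0: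
--             raise ValueError(
--                 f"num_stages {num_stages} must be evenly divisible by pp_size {pp_size} for V schedules"
--             )
--
--         rank_index = 0
--         for stage_index in range(num_stages):
--             mapping[stage_index] = rank_index
--             # dont change rank if we are on the border (to keep v shape)
--             if (stage_index + 1) % pp_size == 0:
--                 continue
--             if (stage_index // pp_size) % 2 == 0:
--                 rank_index += 1
--             else:
--                 rank_index -= 1
--     else:
--         raise ValueError(f"Style {style} is not supported.")
--     return mapping
--
-- def generate_rank_to_stage_mapping(
--     pp_size: int, num_stages: int, style: str = "loop"
-- ) -> dict[int, list[int]]: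
--     """
--     Compute the rank to stage id mapping for either a looped or V-style schedule.
--
--     This function inverts the stage_to_rank_mapping to get which stages are assigned to each rank.
--
--     Returns a dictionary mapping rank -> list of stage indices assigned to that rank.
--     """
--     stage_to_rank = generate_stage_to_rank_mapping(pp_size, num_stages, style)
--
--     # Invert the mapping: rank -> list of stages
--     rank_to_stages: dict[int, list[int]] = {}
--     for stage_id, rank in stage_to_rank.items():
--         if rank not in rank_to_stages:
--             rank_to_stages[rank] = []
--         rank_to_stages[rank].append(stage_id)
--
--     # Sort the stage lists for each rank to ensure consistent ordering
--     for stages in rank_to_stages.values():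
--         stages.sort()
--
--     return rank_to_stages
-- ===== SOURCE B (Python) =====
-- def generate_rank_to_stage_mapping(
--     pp_size: int, num_stages: int, style: str = "loop"
-- ) -> dict[int, list[int]]:
--     """Single fused pass: compute each stage's rank inline and append the stage
--     to that rank's list; stages arrive in increasing order, so no inversion
--     step and no final sort are needed."""
--     rank_to_stages: dict[int, list[int]] = {}
--     if style == "loop":
--         for stage_index in range(num_stages):
--             rank_to_stages.setdefault(stage_index % pp_size, []).append(stage_index)
--     elif style == "v":
--         if num_stages % pp_size != 0:
--             raise ValueError(
--                 f"num_stages {num_stages} must be evenly divisible by pp_size {pp_size} for V schedules"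
--             )
--         rank_index = 0
--         for stage_index in range(num_stages):
--             rank_to_stages.setdefault(rank_index, []).append(stage_index)
--             # dont change rank if we are on the border (to keep v shape)
--             if (stage_index + 1) % pp_size != 0:
--                 if (stage_index // pp_size) % 2 == 0:
--                     rank_index += 1
--                 else:
--                     rank_index -= 1
--     else:
--         raise ValueError(f"Style {style} is not supported.")
--     return rank_to_stages
-- ===== Notes on version B (the rewrite author's own statement) =====
-- stated objective: simpler
-- what changed: B builds rank->stages in a single fused pass over the stage indices (computing each stage's rank inline and appending via setdefault), dropping A's intermediate stage_to_rank dict, the separate inversion loop and the final per-rank sort, which are unnecessary because stages are visited in increasing order.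
import Mathlib
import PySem

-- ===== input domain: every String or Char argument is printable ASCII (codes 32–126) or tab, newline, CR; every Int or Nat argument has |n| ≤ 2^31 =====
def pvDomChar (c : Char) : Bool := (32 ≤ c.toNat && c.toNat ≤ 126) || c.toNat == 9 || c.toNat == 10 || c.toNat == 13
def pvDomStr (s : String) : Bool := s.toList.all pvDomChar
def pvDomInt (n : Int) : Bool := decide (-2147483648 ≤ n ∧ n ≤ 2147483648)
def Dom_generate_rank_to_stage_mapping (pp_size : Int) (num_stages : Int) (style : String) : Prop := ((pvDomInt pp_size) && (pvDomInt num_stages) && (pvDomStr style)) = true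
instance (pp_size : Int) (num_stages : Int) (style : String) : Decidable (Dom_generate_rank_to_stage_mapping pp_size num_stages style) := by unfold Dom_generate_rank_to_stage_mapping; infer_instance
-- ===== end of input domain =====

-- B rebuilds the mapping in one fused pass over the stages (rank computed inline,
-- setdefault-append), dropping A's intermediate stage_to_rank dict, the inversion
-- loop and the final per-rank sort.

-- ===== PORT A =====
-- helper: generate_stage_to_rank_mapping; the 'else: raise ValueError' branch is outside Pre_
def pvA_vstep (pp_size : Int) (st : PySem.Dict Int Int × Int) (i : Int) : PySem.Dict Int Int × Int :=
  let m := st.1.insert i st.2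
  if PySem.Int.mod (i + 1) pp_size = 0 then (m, st.2)
  else if PySem.Int.mod (PySem.Int.floordiv i pp_size) 2 = 0 then (m, st.2 + 1)
  else (m, st.2 - 1)

def pvA_stage_to_rank (pp_size : Int) (num_stages : Int) (style : String) : PySem.Dict Int Int :=
  if style = "loop" then
    (PySem.List.pyRange 0 num_stages).foldl
      (fun m i => m.insert i (PySem.Int.mod i pp_size)) PySem.Dict.empty
  else if style = "v" then
    ((PySem.List.pyRange 0 num_stages).foldl (pvA_vstep pp_size) (PySem.Dict.empty, 0)).1
  else PySem.Dict.empty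

def generate_rank_to_stage_mapping (pp_size : Int) (num_stages : Int) (style : String) : List (Int × List Int) :=
  let stage_to_rank := pvA_stage_to_rank pp_size num_stages style
  let rank_to_stages := stage_to_rank.items.foldl
    (fun (d : PySem.Dict Int (List Int)) p =>
      let d' := if d.contains p.2 then d else d.insert p.2 []
      d'.modify p.2 [] (· ++ [p.1]))
    PySem.Dict.empty
  rank_to_stages.items.map (fun p => (p.1, PySem.List.sorted p.2 (fun x => x)))

-- ===== PORT B =====
def pvB_vstep (pp_size : Int) (st : PySem.Dict Int (List Int) × Int) (i : Int) :
    PySem.Dict Int (List Int) × Int :=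
  let d := st.1.modify st.2 [] (· ++ [i])
  if PySem.Int.mod (i + 1) pp_size ≠ 0 then
    if PySem.Int.mod (PySem.Int.floordiv i pp_size) 2 = 0 then (d, st.2 + 1) else (d, st.2 - 1)
  else (d, st.2)

def generate_rank_to_stage_mapping_alt (pp_size : Int) (num_stages : Int) (style : String) : List (Int × List Int) :=
  if style = "loop" then
    ((PySem.List.pyRange 0 num_stages).foldl
      (fun (d : PySem.Dict Int (List Int)) i =>
        d.modify (PySem.Int.mod i pp_size) [] (· ++ [i]))
      PySem.Dict.empty).items
  else if style = "v" then
    (((PySem.List.pyRange 0 num_stages).foldl (pvB_vstep pp_size) (PySem.Dict.empty, 0)).1).items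
  else []

-- ===== PRECONDITION & SPEC =====
-- Pre_ excludes exactly the inputs where A raises: an unsupported style (ValueError),
-- pp_size = 0 reaching a '%' (ZeroDivisionError), and V-style with num_stages not
-- divisible by pp_size (ValueError). B raises the same exceptions there.
def Pre_generate_rank_to_stage_mapping (pp_size : Int) (num_stages : Int) (style : String) : Prop :=
  (style = "loop" ∧ (pp_size ≠ 0 ∨ num_stages ≤ 0)) ∨
  (style = "v" ∧ pp_size ≠ 0 ∧ PySem.Int.mod num_stages pp_size = 0)
instance (pp_size : Int) (num_stages : Int) (style : String) : Decidable (Pre_generate_rank_to_stage_mapping pp_size num_stages style) := by unfold Pre_generate_rank_to_stage_mapping; infer_instance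

def pvWitness_generate_rank_to_stage_mapping : Int × Int × String := (2, 4, "v")

def Spec_generate_rank_to_stage_mapping (pp_size : Int) (num_stages : Int) (style : String) (out : List (Int × List Int)) : Prop := out = generate_rank_to_stage_mapping_alt pp_size num_stages style
instance (pp_size : Int) (num_stages : Int) (style : String) (out : List (Int × List Int)) : Decidable (Spec_generate_rank_to_stage_mapping pp_size num_stages style out) := by unfold Spec_generate_rank_to_stage_mapping; infer_instance

-- ===== CLAIM (what is proved, stated in full; the proofs are below) =====
def Claim_equal_generate_rank_to_stage_mapping : Prop := ∀ (pp_size : Int) (num_stages : Int) (style : String), Dom_generate_rank_to_stage_mapping pp_size num_stages style → Pre_generate_rank_to_stage_mapping pp_size num_stages style → Spec_generate_rank_to_stage_mapping pp_size num_stages style (generate_rank_to_stage_mapping pp_size num_stages style)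

-- ===== LEMMAS AND PROOFS =====

-- the canonical per-pair step (append stage p.1 to the list at rank p.2); both
-- A's contains/insert/modify inversion step and B's setdefault-append reduce to it
def pvCStep (d : PySem.Dict Int (List Int)) (p : Int × Int) : PySem.Dict Int (List Int) :=
  d.modify p.2 [] (· ++ [p.1])

lemma pv_step_collapse (d : PySem.Dict Int (List Int)) (p : Int × Int) :
    (let d' := if d.contains p.2 then d else d.insert p.2 []
     d'.modify p.2 [] (· ++ [p.1])) = pvCStep d p := by
  show (if d.contains p.2 then d else d.insert p.2 []).modify p.2 [] (· ++ [p.1]) = _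
  by_cases h : d.contains p.2 = true
  · simp [h, pvCStep]
  · simp only [Bool.not_eq_true] at h
    simp only [h, Bool.false_eq_true, if_false, pvCStep, PySem.Dict.modify,
      PySem.Dict.insert_insert_self, PySem.Dict.getD_insert_self,
      PySem.Dict.getD_of_not_contains _ _ h]

lemma pv_inv_eq_cfold (ps : List (Int × Int)) (e : PySem.Dict Int (List Int)) :
    ps.foldl (fun (d : PySem.Dict Int (List Int)) p =>
      let d' := if d.contains p.2 then d else d.insert p.2 []
      d'.modify p.2 [] (· ++ [p.1])) e = ps.foldl pvCStep e := by
  have : (fun (d : PySem.Dict Int (List Int)) p =>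
      let d' := if d.contains p.2 then d else d.insert p.2 []
      d'.modify p.2 [] (· ++ [p.1])) = pvCStep := by
    funext d p; exact pv_step_collapse d p
  rw [this]

lemma pv_cfold_nodup_keys (ps : List (Int × Int)) (d : PySem.Dict Int (List Int))
    (h : d.keys.Nodup) : (ps.foldl pvCStep d).keys.Nodup :=
  PySem.Dict.nodup_keys_foldl_modify_key ps (·.2) [] (fun _ p => (· ++ [p.1])) d h

lemma pv_cfold_getD_pairwise (ps : List (Int × Int)) (d : PySem.Dict Int (List Int))
    (hps : ps.Pairwise (fun p q => p.1 < q.1))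
    (h : ∀ c, (d.getD c []).Pairwise (· < ·) ∧ ∀ x ∈ d.getD c [], ∀ p ∈ ps, x < p.1) :
    ∀ c, ((ps.foldl pvCStep d).getD c []).Pairwise (· < ·) := by
  induction ps generalizing d with
  | nil => intro c; exact (h c).1
  | cons p ps ih =>
    intro c
    rw [List.foldl_cons]
    apply ih (pvCStep d p) (hps.sublist (List.sublist_cons_self p ps))
    intro c'
    have hgd : (pvCStep d p).getD c' [] = if c' = p.2 then d.getD p.2 [] ++ [p.1] else d.getD c' [] := by
      simp [pvCStep, PySem.Dict.getD_modify]
    constructor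
    · rw [hgd]; split_ifs with hc
      · refine List.pairwise_append.mpr ⟨(h p.2).1, List.pairwise_singleton _ _, ?_⟩
        intro x hx y hy
        simp at hy; subst hy
        exact (h p.2).2 x hx p (List.mem_cons_self ..)
      · exact (h c').1
    · intro x hx q hq
      rw [hgd] at hx; split_ifs at hx with hc
      · rcases List.mem_append.mp hx with hx | hx
        · exact (h p.2).2 x hx q (List.mem_cons_of_mem _ hq)
        · simp at hx; subst hx
          exact (List.pairwise_cons.mp hps).1 q hq
      · exact (h c').2 x hx q (List.mem_cons_of_mem _ hq)

lemma pv_map_sorted_id (d : PySem.Dict Int (List Int)) (hnd : d.keys.Nodup)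
    (h : ∀ c, (d.getD c []).Pairwise (· < ·)) :
    d.items.map (fun p => (p.1, PySem.List.sorted p.2 (fun x => x))) = d.items := by
  have : ∀ p ∈ d.items, (p.1, PySem.List.sorted p.2 (fun x => x)) = p := by
    intro p hp
    have hv : d.getD p.1 [] = p.2 := PySem.Dict.getD_of_mem_items d hp hnd []
    have : p.2.Pairwise (fun a b => a ≤ b) := by
      have := h p.1; rw [hv] at this; exact this.imp (fun hab => le_of_lt hab)
    rw [PySem.List.sorted_eq_self_of_pairwise p.2 (fun x => x) this]
  calc d.items.map (fun p => (p.1, PySem.List.sorted p.2 (fun x => x)))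
      = d.items.map id := List.map_congr_left this
    _ = d.items := List.map_id d.items

lemma pv_pyRange_pairwise (n : Int) : (PySem.List.pyRange 0 n).Pairwise (· < ·) := by
  by_cases h : 0 ≤ n
  · obtain ⟨m, rfl⟩ := Int.eq_ofNat_of_zero_le h
    rw [PySem.List.pyRange_zero_natCast, List.pairwise_map]
    exact (List.pairwise_lt_range).imp (fun hab => by exact_mod_cast hab)
  · have : (PySem.List.pyRange 0 n) = [] := by simp [PySem.List.pyRange]; omega
    simp [this]

lemma pv_pyRange_nodup (n : Int) : (PySem.List.pyRange 0 n).Nodup :=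
  (pv_pyRange_pairwise n).imp (fun h => ne_of_lt h)

-- loop style: A's stage_to_rank items are the obvious (stage, rank) pair list
lemma pv_loop_items (pp_size n : Int) :
    ((PySem.List.pyRange 0 n).foldl
      (fun (m : PySem.Dict Int Int) i => m.insert i (PySem.Int.mod i pp_size))
      PySem.Dict.empty).items
    = (PySem.List.pyRange 0 n).map (fun i => (i, PySem.Int.mod i pp_size)) := by
  have := PySem.Dict.items_foldl_insert_fresh (PySem.List.pyRange 0 n)
    (fun i => i) (fun i => PySem.Int.mod i pp_size) (PySem.Dict.empty)
    (by intro a _; simp [PySem.Dict.contains_empty]) (by simpa using pv_pyRange_nodup n)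
  simpa using this

-- v style: joint invariant of A's stage loop and B's fused loop
lemma pv_vjoint (pp_size : Int) (m : Nat) :
    (((PySem.List.pyRange 0 (m : Int)).foldl (pvA_vstep pp_size) (PySem.Dict.empty, 0)).2
      = ((PySem.List.pyRange 0 (m : Int)).foldl (pvB_vstep pp_size) (PySem.Dict.empty, 0)).2)
    ∧ (((PySem.List.pyRange 0 (m : Int)).foldl (pvA_vstep pp_size) (PySem.Dict.empty, 0)).1.items.map (·.1)
      = PySem.List.pyRange 0 (m : Int))
    ∧ (((PySem.List.pyRange 0 (m : Int)).foldl (pvA_vstep pp_size) (PySem.Dict.empty, 0)).1.items.foldl pvCStep PySem.Dict.empty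
      = ((PySem.List.pyRange 0 (m : Int)).foldl (pvB_vstep pp_size) (PySem.Dict.empty, 0)).1) := by
  induction m with
  | zero => refine ⟨rfl, by simp [PySem.Dict.empty], rfl⟩
  | succ m ih =>
    obtain ⟨ihr, ihk, ihd⟩ := ih
    have hpeel : PySem.List.pyRange 0 ((m + 1 : Nat) : Int) = PySem.List.pyRange 0 (m : Int) ++ [(m : Int)] := by
      push_cast
      exact PySem.List.pyRange_one_succ_right (by positivity)
    set A := (PySem.List.pyRange 0 (m : Int)).foldl (pvA_vstep pp_size) (PySem.Dict.empty, 0) with hA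
    set B := (PySem.List.pyRange 0 (m : Int)).foldl (pvB_vstep pp_size) (PySem.Dict.empty, 0) with hB
    have hnotmem : (m : Int) ∉ A.1.keys := by
      show (m : Int) ∉ A.1.items.map (·.1)
      rw [ihk, PySem.List.mem_pyRange_one]
      omega
    have hcont : A.1.contains (m : Int) = false := by
      rw [PySem.Dict.contains_eq_decide_mem_keys]
      simpa using hnotmem
    have hitems : (A.1.insert (m : Int) A.2).items = A.1.items ++ [((m : Int), A.2)] :=
      PySem.Dict.items_insert_of_not_contains _ _ hcont
    rw [hpeel]
    simp only [List.foldl_append, List.foldl_cons, List.foldl_nil, ← hA, ← hB]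
    have hdict : (pvA_vstep pp_size A (m : Int)).1 = A.1.insert (m : Int) A.2 := by
      simp only [pvA_vstep]; split_ifs <;> rfl
    have hbdict : (pvB_vstep pp_size B (m : Int)).1 = B.1.modify B.2 [] (· ++ [(m : Int)]) := by
      simp only [pvB_vstep]; split_ifs <;> rfl
    have hrank : (pvA_vstep pp_size A (m : Int)).2 = (pvB_vstep pp_size B (m : Int)).2 := by
      simp only [pvA_vstep, pvB_vstep, ihr]
      split_ifs <;> simp_all
    refine ⟨hrank, ?_, ?_⟩
    · rw [hdict, hitems, List.map_append, ihk]
      rfl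
    · rw [hdict, hitems, List.foldl_append, ihd, List.foldl_cons, List.foldl_nil, hbdict]
      simp [pvCStep, ihr]

-- final step shared by both styles: if the (stage, rank) items list ps has strictly
-- increasing stages and B's dict is the canonical fold of ps, A's invert+sort equals B
lemma pv_final (ps : List (Int × Int)) (bD : PySem.Dict Int (List Int))
    (hps : (ps.map (·.1)).Pairwise (· < ·))
    (hbd : ps.foldl pvCStep PySem.Dict.empty = bD) :
    ((ps.foldl (fun (d : PySem.Dict Int (List Int)) p =>
        let d' := if d.contains p.2 then d else d.insert p.2 []
        d'.modify p.2 [] (· ++ [p.1])) PySem.Dict.empty).items.map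
          (fun p => (p.1, PySem.List.sorted p.2 (fun x => x)))) = bD.items := by
  subst hbd
  rw [pv_inv_eq_cfold]
  apply pv_map_sorted_id
  · exact pv_cfold_nodup_keys ps _ (by simp [PySem.Dict.empty, PySem.Dict.keys])
  · apply pv_cfold_getD_pairwise ps _ (by rwa [List.pairwise_map] at hps)
    intro c; simp [PySem.Dict.getD_empty]

-- ===== VERDICT (by name: the statement is the Claim_ definition above) =====
theorem generate_rank_to_stage_mapping_spec : Claim_equal_generate_rank_to_stage_mapping := by
  intro pp n style _ hpre
  show generate_rank_to_stage_mapping pp n style = generate_rank_to_stage_mapping_alt pp n style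
  rcases hpre with ⟨rfl, -⟩ | ⟨rfl, -, -⟩
  · -- loop style
    simp only [generate_rank_to_stage_mapping, generate_rank_to_stage_mapping_alt,
      pvA_stage_to_rank, String.reduceEq, reduceIte]
    rw [pv_loop_items]
    apply pv_final
    · rw [List.map_map]
      have : ((fun p => p.1) ∘ fun i => (i, PySem.Int.mod i pp)) = id := rfl
      rw [this, List.map_id]
      exact pv_pyRange_pairwise n
    · rw [List.foldl_map]; rfl
  · -- v style
    simp only [generate_rank_to_stage_mapping, generate_rank_to_stage_mapping_alt,
      pvA_stage_to_rank, String.reduceEq, reduceIte]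
    by_cases hn : 0 ≤ n
    · obtain ⟨m, rfl⟩ := Int.eq_ofNat_of_zero_le hn
      obtain ⟨-, hk, hd⟩ := pv_vjoint pp m
      apply pv_final _ _ (by rw [hk]; exact pv_pyRange_pairwise _) hd
    · have hnil : PySem.List.pyRange 0 n = [] := by simp [PySem.List.pyRange]; omega
      simp [hnil, PySem.Dict.empty]
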